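-- pv_equiv track=rewrite | github.com/ariesduanmu/ctf_challenges | codefights/crossie_road.py | crossieRoad_bruteforce
-- ===== SOURCE A (Python) =====
-- def crossieRoad_bruteforce(lanes):
--     '''
--     brute force
--     my solution was close to it, but I spend too much time in lots (meaningless) if/else in while loop
--     '''
--     if len(lanes) == 0:
--         return 1
--     i = 0
--     while i < 415000:
--         for x,y,z in lanes:
--             if (i-z)%(x+y)<x:
--                 break;
--         else:
--             return i + 1
--         i += 1
--     return -1
-- ===== SOURCE B (Python) =====
-- def crossieRoad_bruteforce(lanes):
--     # Interval-jumping: instead of testing every time step, jump from a blocked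
--     # time t directly past the blocking lane's unsafe window (t += x - (t-z)%(x+y)).
--     t = 0
--     while t < 415000:
--         for x, y, z in lanes:
--             r = (t - z) % (x + y)
--             if r < x:
--                 t += x - r
--                 break
--         else:
--             return t + 1
--     return -1
-- ===== Notes on version B (the rewrite author's own statement) =====
-- stated objective: faster
-- what changed: B replaces A's time-outer scan that re-tests every single time step with interval jumping: at a blocked time t it advances t directly past the blocking lane's whole unsafe window (t += x - (t-z)%(x+y)), so long blocked stretches cost one step instead of one per tick; the empty-lanes special case disappears.
-- outside the precondition, e.g. on crossieRoad_bruteforce([(1, 0, 0), (1, -1, 0)]): A returns -1, B returns -1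
import Mathlib
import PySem

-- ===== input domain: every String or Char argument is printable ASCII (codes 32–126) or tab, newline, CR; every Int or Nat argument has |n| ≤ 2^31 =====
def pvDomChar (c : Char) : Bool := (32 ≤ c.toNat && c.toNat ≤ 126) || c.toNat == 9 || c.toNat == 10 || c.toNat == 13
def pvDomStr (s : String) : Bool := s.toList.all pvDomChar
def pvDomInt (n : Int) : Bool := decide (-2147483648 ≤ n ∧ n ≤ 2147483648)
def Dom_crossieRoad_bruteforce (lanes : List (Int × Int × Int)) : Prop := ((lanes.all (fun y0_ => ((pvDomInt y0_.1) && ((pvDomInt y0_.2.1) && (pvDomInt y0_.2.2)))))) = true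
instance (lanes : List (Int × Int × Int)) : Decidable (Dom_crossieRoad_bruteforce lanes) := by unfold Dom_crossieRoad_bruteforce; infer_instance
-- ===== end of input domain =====

-- B replaces A's time-by-time scan with interval jumping: from a blocked time it skips
-- directly past the blocking lane's unsafe window (objective: faster on long blocked windows).


-- ===== PORT A =====
-- the inner 'for … else' of A: some lane blocks time i ⇔ the for-loop breaks
def pvABlocked (lanes : List (Int × Int × Int)) (i : Int) : Bool :=
  lanes.any (fun l => PySem.Int.mod (i - l.2.2) (l.1 + l.2.1) < l.1)

-- the 'while i < 415000' loop of A, one fuel unit per iteration check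
def pvALoop (lanes : List (Int × Int × Int)) : Nat → Int → Int
  | 0, _ => -1
  | n + 1, i =>
    if i < 415000 then
      if pvABlocked lanes i then pvALoop lanes n (i + 1) else i + 1
    else -1

def crossieRoad_bruteforce (lanes : List (Int × Int × Int)) : Int :=
  if lanes.length = 0 then 1 else pvALoop lanes 415001 0

-- ===== PORT B =====
-- the 'while t < 415000' loop of B: find the first blocking lane, jump past its window
def pvBLoop (lanes : List (Int × Int × Int)) : Nat → Int → Int
  | 0, _ => -1
  | n + 1, t =>
    if t < 415000 then
      match lanes.find? (fun l => PySem.Int.mod (t - l.2.2) (l.1 + l.2.1) < l.1) with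
      | some l => pvBLoop lanes n (t + (l.1 - PySem.Int.mod (t - l.2.2) (l.1 + l.2.1)))
      | none => t + 1
    else -1

def crossieRoad_bruteforce_alt (lanes : List (Int × Int × Int)) : Int :=
  pvBLoop lanes 415001 0

-- ===== PRECONDITION & SPEC =====
-- Pre_ excludes lanes containing a zero period x+y = 0, on which the Python programs
-- generally raise ZeroDivisionError (a lane blocking every earlier time can keep A from
-- ever reaching the zero-period lane, so A occasionally still returns -1 there).
def Pre_crossieRoad_bruteforce (lanes : List (Int × Int × Int)) : Prop :=
  ∀ l ∈ lanes, l.1 + l.2.1 ≠ 0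
instance (lanes : List (Int × Int × Int)) : Decidable (Pre_crossieRoad_bruteforce lanes) := by unfold Pre_crossieRoad_bruteforce; infer_instance
def pvWitness_crossieRoad_bruteforce : (List (Int × Int × Int)) := [(1, 2, 0), (2, 3, 4)]

def Spec_crossieRoad_bruteforce (lanes : List (Int × Int × Int)) (out : Int) : Prop := out = crossieRoad_bruteforce_alt lanes
instance (lanes : List (Int × Int × Int)) (out : Int) : Decidable (Spec_crossieRoad_bruteforce lanes out) := by unfold Spec_crossieRoad_bruteforce; infer_instance

-- ===== CLAIM (what is proved, stated in full; the proofs are below) =====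
def Claim_equal_crossieRoad_bruteforce : Prop := ∀ (lanes : List (Int × Int × Int)), Dom_crossieRoad_bruteforce lanes → Pre_crossieRoad_bruteforce lanes → Spec_crossieRoad_bruteforce lanes (crossieRoad_bruteforce lanes)

-- ===== LEMMAS AND PROOFS =====

-- A lane blocking time t keeps blocking the whole window [t, t + (x - r))
lemma pv_window_blocked (x z : Int) (t r : Int) (p : Int)
    (hr : r = PySem.Int.mod (t - z) p) (hrx : r < x) (k : Nat) (hk : (k : Int) < x - r) :
    PySem.Int.mod (t + k - z) p < x := by
  subst hr
  rw [show t + (k : Int) - z = (t - z) + k by ring]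
  have key : PySem.Int.mod ((t - z) + k) p
      = PySem.Int.mod (PySem.Int.mod (t - z) p + k) p := by
    conv_lhs => rw [← PySem.Int.floordiv_mul_add_mod (t - z) p]
    show Int.fmod _ _ = Int.fmod _ _
    rw [show PySem.Int.floordiv (t - z) p * p + PySem.Int.mod (t - z) p + (k : Int)
        = (PySem.Int.mod (t - z) p + (k : Int)) + p * PySem.Int.floordiv (t - z) p by ring]
    exact Int.add_mul_fmod_self_left _ _ _
  rw [key]
  set r := PySem.Int.mod (t - z) p with hrdef
  set v : Int := r + k with hv
  have hvx : v < x := by omega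
  rcases lt_trichotomy p 0 with hp | hp | hp
  · have hb := PySem.Int.mod_neg_bounds v hp
    by_cases hx : 0 < x
    · omega
    · have hrb := PySem.Int.mod_neg_bounds (t - z) hp
      have hv0 : p < v := by omega
      have : PySem.Int.mod v p = v := by
        show Int.fmod v p = v
        have := Int.neg_fmod_neg v p
        have h2 : Int.fmod (-v) (-p) = -v :=
          Int.fmod_eq_of_lt (by omega) (by omega)
        omega
      omega
  · subst hp
    show Int.fmod v 0 < x
    rw [Int.fmod_zero]; omega
  · have h1 := PySem.Int.mod_nonneg v hp
    have h2 := PySem.Int.mod_lt v hp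
    by_cases hx : p ≤ x
    · omega
    · have hr0 := PySem.Int.mod_nonneg (t - z) hp
      have : PySem.Int.mod v p = v := Int.fmod_eq_of_lt (by omega) (by omega)
      omega

lemma pvALoop_of_ge (lanes : List (Int × Int × Int)) (n : Nat) (i : Int)
    (h : (415000 : Int) ≤ i) : pvALoop lanes n i = -1 := by
  cases n with
  | zero => rfl
  | succ m => simp [pvALoop, show ¬ i < 415000 by omega]

-- A's loop steps through a fully blocked window one tick at a time
lemma pvALoop_skip (lanes : List (Int × Int × Int)) (j : Nat) :
    ∀ (n : Nat) (i : Int), j ≤ n →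
    (∀ k : Nat, k < j → pvABlocked lanes (i + k) = true) →
    pvALoop lanes n i = pvALoop lanes (n - j) (i + j) := by
  induction j with
  | zero => intro n i _ _; simp
  | succ m ih =>
    intro n i hjn hb
    by_cases hlt : i < 415000
    · obtain ⟨n', rfl⟩ : ∃ n', n = n' + 1 := ⟨n - 1, by omega⟩
      have h0 : pvABlocked lanes i = true := by
        have := hb 0 (by omega); simpa using this
      have hstep : pvALoop lanes (n' + 1) i = pvALoop lanes n' (i + 1) := by
        simp [pvALoop, hlt, h0]
      rw [hstep, ih n' (i + 1) (by omega)
        (fun k hk => by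
          have := hb (k + 1) (by omega)
          simpa [add_assoc, add_comm, add_left_comm] using this)]
      congr 1
      · omega
      · push_cast; ring
    · rw [pvALoop_of_ge lanes n i (by omega)]
      exact (pvALoop_of_ge lanes (n - (m + 1)) (i + ((m + 1 : Nat) : Int)) (by push_cast; omega)).symm

lemma pvBLoop_of_ge (lanes : List (Int × Int × Int)) (n : Nat) (t : Int)
    (h : (415000 : Int) ≤ t) : pvBLoop lanes n t = -1 := by
  cases n with
  | zero => rfl
  | succ m => simp [pvBLoop, show ¬ t < 415000 by omega]

lemma pv_find_none_not_blocked (lanes : List (Int × Int × Int)) (t : Int)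
    (h : lanes.find? (fun l => PySem.Int.mod (t - l.2.2) (l.1 + l.2.1) < l.1) = none) :
    pvABlocked lanes t = false := by
  rw [List.find?_eq_none] at h
  simp only [pvABlocked, List.any_eq_false]
  intro l hl
  simpa using h l hl

-- main correspondence between the two loops
lemma pv_loops_eq (lanes : List (Int × Int × Int)) :
    ∀ (nB : Nat) (t : Int) (nA : Nat),
    (415000 : Int) ≤ t + nB → (415000 : Int) ≤ t + nA →
    pvALoop lanes nA t = pvBLoop lanes nB t := by
  intro nB
  induction nB with
  | zero =>
    intro t nA hB hA
    rw [pvALoop_of_ge lanes nA t (by omega)]; rfl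
  | succ m ih =>
    intro t nA hB hA
    by_cases hlt : t < 415000
    · cases hfind : lanes.find? (fun l => PySem.Int.mod (t - l.2.2) (l.1 + l.2.1) < l.1) with
      | none =>
        have hnb := pv_find_none_not_blocked lanes t hfind
        obtain ⟨n', rfl⟩ : ∃ n', nA = n' + 1 := ⟨nA - 1, by omega⟩
        simp [pvALoop, pvBLoop, hlt, hnb, hfind]
      | some l =>
        obtain ⟨x, y, z⟩ := l
        have hpred := List.find?_some hfind
        have hmem := List.mem_of_find?_eq_some hfind
        have hrx : PySem.Int.mod (t - z) (x + y) < x := by simpa using hpred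
        set r := PySem.Int.mod (t - z) (x + y) with hrdef
        set j : Nat := (x - r).toNat with hjdef
        have hjcast : (j : Int) = x - r := by omega
        have hj1 : 1 ≤ j := by omega
        have hB' : pvBLoop lanes (m + 1) t = pvBLoop lanes m (t + (x - r)) := by
          rw [hrdef]
          simp [pvBLoop, hlt, hfind]
        have hblocked : ∀ k : Nat, k < j → pvABlocked lanes (t + k) = true := by
          intro k hk
          have hw := pv_window_blocked x z t r (x + y) rfl hrx k (by omega)
          simp only [pvABlocked, List.any_eq_true]
          exact ⟨(x, y, z), hmem, by simpa using hw⟩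
        by_cases hjn : j ≤ nA
        · rw [pvALoop_skip lanes j nA t hjn hblocked, hB',
            show t + (x - r) = t + (j : Int) by omega]
          exact ih (t + (j : Int)) (nA - j) (by omega) (by omega)
        · have hblocked' : ∀ k : Nat, k < nA → pvABlocked lanes (t + k) = true :=
            fun k hk => hblocked k (by omega)
          rw [pvALoop_skip lanes nA nA t le_rfl hblocked', Nat.sub_self, hB']
          rw [pvBLoop_of_ge lanes m (t + (x - r)) (by omega)]
          rfl
    · rw [pvALoop_of_ge lanes nA t (by omega),
        pvBLoop_of_ge lanes (m + 1) t (by omega)]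

-- ===== VERDICT (by name: the statement is the Claim_ definition above) =====
theorem crossieRoad_bruteforce_spec : Claim_equal_crossieRoad_bruteforce := by
  intro lanes _ _
  unfold Spec_crossieRoad_bruteforce crossieRoad_bruteforce crossieRoad_bruteforce_alt
  by_cases h : lanes.length = 0
  · have : lanes = [] := List.length_eq_zero_iff.mp h
    subst this
    simp [pvBLoop, List.find?]
  · rw [if_neg h]
    exact pv_loops_eq lanes 415001 0 415001 (by norm_num) (by norm_num)
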